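-- pv_equiv track=rewrite | github.com/xiemian/Leetcode-Lintcode | LintCode/kSubstringWithkDifferentCharacters.py | KSubstring
-- ===== SOURCE A (Python) =====
-- def KSubstring(stringIn, K):
--     # Write your code here
--     length = len(stringIn)
--     dict = {}
--     index = 0
--     list = []
--     for i in range(length):
--         if (stringIn[i] in dict and dict[stringIn[i]] >= index):
--             index = dict[stringIn[i]] + 1
--         else:
--             if(i - index + 1 == K):
--                 list.append(stringIn[index:i+1])
--                 index += 1
--         dict[stringIn[i]] = i
--     return len(set(list))
-- ===== SOURCE B (Python) =====
-- def KSubstring(stringIn, K):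
--     # Brute force: collect every length-K window whose characters are all distinct.
--     if K < 1:
--         return 0
--     return len({stringIn[i:i + K] for i in range(len(stringIn) - K + 1)
--                 if len(set(stringIn[i:i + K])) == K})
-- ===== Notes on version B (the rewrite author's own statement) =====
-- stated objective: simpler
-- what changed: Replaced A's stateful sliding window (last-occurrence dict, incrementally advanced left index) by a stateless brute-force set comprehension over all length-K windows, keeping only those with K distinct characters.
import Mathlib
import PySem

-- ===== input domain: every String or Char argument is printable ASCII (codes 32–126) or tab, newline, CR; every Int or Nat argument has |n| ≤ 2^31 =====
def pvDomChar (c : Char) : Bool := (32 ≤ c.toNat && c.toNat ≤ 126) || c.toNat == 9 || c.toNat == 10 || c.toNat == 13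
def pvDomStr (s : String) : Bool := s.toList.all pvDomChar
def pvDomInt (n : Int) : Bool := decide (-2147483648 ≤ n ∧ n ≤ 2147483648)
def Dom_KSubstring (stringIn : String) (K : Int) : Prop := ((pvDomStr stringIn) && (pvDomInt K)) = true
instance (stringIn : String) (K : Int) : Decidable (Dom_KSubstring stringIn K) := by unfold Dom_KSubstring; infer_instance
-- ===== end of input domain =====

-- B replaces A's sliding window by a stateless brute-force scan over all length-K windows (objective: simpler).

-- ===== PORT A =====
-- one iteration of A's 'for i in range(length)' loop; state = (dict, index, list)
def KSubAStep (l : List Char) (K : Int)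
    (st : PySem.Dict Char Int × Int × List (List Char)) (p : Int × Char) :
    PySem.Dict Char Int × Int × List (List Char) :=
  let d := st.1
  let index := st.2.1
  let lst := st.2.2
  let i := p.1
  let c := p.2
  if d.contains c && decide (d.getD c 0 ≥ index) then
    (d.insert c i, d.getD c 0 + 1, lst)
  else if i - index + 1 == K then
    (d.insert c i, index + 1, lst ++ [PySem.List.slice l (some index) (some (i + 1))])
  else
    (d.insert c i, index, lst)

def KSubstring (stringIn : String) (K : Int) : Int :=
  let l := stringIn.toList
  let fin := (PySem.List.enumerate l 0).foldl (KSubAStep l K) (PySem.Dict.empty, 0, [])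
  ((PySem.Set.ofList fin.2.2).length : Int)

-- ===== PORT B =====
def KSubstring_alt (stringIn : String) (K : Int) : Int :=
  if K < 1 then 0
  else
    let l := stringIn.toList
    let wins := (PySem.List.pyRange 0 ((l.length : Int) - K + 1) 1).foldl
      (fun (acc : PySem.Set (List Char)) j =>
        let w := PySem.List.slice l (some j) (some (j + K))
        if ((PySem.Set.ofList w).length : Int) == K then PySem.Set.add acc w else acc)
      PySem.Set.empty
    (wins.length : Int)

-- ===== PRECONDITION & SPEC =====
def Spec_KSubstring (stringIn : String) (K : Int) (out : Int) : Prop := out = KSubstring_alt stringIn K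
instance (stringIn : String) (K : Int) (out : Int) : Decidable (Spec_KSubstring stringIn K out) := by unfold Spec_KSubstring; infer_instance

-- ===== CLAIM (what is proved, stated in full; the proofs are below) =====
def Claim_equal_KSubstring : Prop := ∀ (stringIn : String) (K : Int), Dom_KSubstring stringIn K → Spec_KSubstring stringIn K (KSubstring stringIn K)

-- ===== LEMMAS AND PROOFS =====

-- the window of length k starting at position j
def KWin (l : List Char) (k j : Nat) : List Char := (l.drop j).take k

-- the all-distinct windows of length k lying inside the first i characters, in order of start
def KQuals (l : List Char) (k i : Nat) : List (List Char) :=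
  ((List.range (i + 1 - k)).filter (fun j => decide ((KWin l k j).Nodup))).map (KWin l k)

-- A's dict is the last-occurrence map of the first i characters
def KDictInv (l : List Char) (i : Nat) (d : PySem.Dict Char Int) : Prop :=
  (∀ c v, d.get? c = some v →
    ∃ m : Nat, v = (m : Int) ∧ m < i ∧ ∃ hm : m < l.length, l[m] = c ∧
      ∀ p, ∀ hp : p < l.length, m < p → p < i → l[p] ≠ c) ∧
  (∀ m, ∀ hm : m < l.length, m < i → (d.get? l[m]).isSome = true)

-- A's loop invariant after processing the first i characters (K ≥ 1)
def KInvA (l : List Char) (K : Int) (i : Nat)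
    (st : PySem.Dict Char Int × Int × List (List Char)) : Prop :=
  (∃ j : Nat, st.2.1 = (j : Int) ∧ j ≤ i ∧ (i : Int) - j ≤ K - 1 ∧
    ((l.take i).drop j).Nodup ∧
    (j = 0 ∨ ¬ ((l.take i).drop (j - 1)).Nodup ∨ (i : Int) - j = K - 1)) ∧
  KDictInv l i st.1 ∧
  st.2.2 = KQuals l K.toNat i

-- membership in a segment l[j:i]
theorem mem_seg_iff (l : List Char) (i j : Nat) (x : Char) :
    x ∈ (l.take i).drop j ↔ ∃ p : Nat, j ≤ p ∧ p < i ∧ l[p]? = some x := by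
  rw [List.mem_iff_getElem?]
  constructor
  · rintro ⟨q, hq⟩
    rw [List.getElem?_drop, List.getElem?_take] at hq
    by_cases h : j + q < i
    · rw [if_pos h] at hq
      exact ⟨j + q, by omega, h, hq⟩
    · rw [if_neg h] at hq; cases hq
  · rintro ⟨p, h1, h2, hp⟩
    refine ⟨p - j, ?_⟩
    rw [List.getElem?_drop, List.getElem?_take, if_pos (by omega)]
    rwa [Nat.add_sub_cancel' h1]

theorem take_succ_getElem (l : List Char) (i : Nat) (hi : i < l.length) :
    l.take (i + 1) = l.take i ++ [l[i]] := by
  rw [List.take_add_one, List.getElem?_eq_getElem hi]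
  rfl

theorem drop_take_succ (l : List Char) (i j : Nat) (hi : i < l.length) (hj : j ≤ i) :
    (l.take (i + 1)).drop j = (l.take i).drop j ++ [l[i]] := by
  rw [take_succ_getElem l i hi, List.drop_append_of_le_length (by simp; omega)]

theorem nodup_append_char (xs : List Char) (c : Char) :
    (xs ++ [c]).Nodup ↔ xs.Nodup ∧ c ∉ xs := by
  rw [List.nodup_append]
  constructor
  · rintro ⟨h1, -, h3⟩
    exact ⟨h1, fun hc => h3 c hc c (List.mem_singleton_self c) rfl⟩
  · rintro ⟨h1, h2⟩
    refine ⟨h1, List.nodup_singleton c, fun a ha b hb => ?_⟩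
    rw [List.mem_singleton] at hb
    subst hb
    exact fun he => h2 (he ▸ ha)

theorem kWin_not_nodup (l : List Char) (k j a b : Nat) (hjk : j + k ≤ l.length)
    (ha : j ≤ a) (ha' : a < j + k) (hb : j ≤ b) (hb' : b < j + k) (hab : a ≠ b)
    (c : Char) (hca : l[a]? = some c) (hcb : l[b]? = some c) : ¬ (KWin l k j).Nodup := by
  intro hnd
  have hlen : (KWin l k j).length = k := by simp [KWin]; omega
  have hget : ∀ q : Nat, j ≤ q → q < j + k → (KWin l k j)[q - j]? = l[q]? := by
    intro q h1 h2
    rw [KWin, List.getElem?_take, if_pos (by omega), List.getElem?_drop,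
      Nat.add_sub_cancel' h1]
  have hwa := hget a ha ha'
  have hwb := hget b hb hb'
  rw [hca] at hwa
  rw [hcb] at hwb
  obtain ⟨hla, hea⟩ := List.getElem?_eq_some_iff.mp hwa
  obtain ⟨hlb, heb⟩ := List.getElem?_eq_some_iff.mp hwb
  have := (List.Nodup.getElem_inj_iff hnd).mp (hea.trans heb.symm)
  omega

theorem kDictInv_empty (l : List Char) : KDictInv l 0 PySem.Dict.empty := by
  refine ⟨fun c v h => by simp [PySem.Dict.get?_empty] at h, fun m hm h => by omega⟩

theorem kDictInv_step (l : List Char) (i : Nat) (hi : i < l.length) (d : PySem.Dict Char Int)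
    (h : KDictInv l i d) : KDictInv l (i + 1) (d.insert l[i] (i : Int)) := by
  obtain ⟨h1, h2⟩ := h
  constructor
  · intro c v hv
    rw [PySem.Dict.get?_insert] at hv
    by_cases hc : c = l[i]
    · rw [if_pos hc] at hv
      cases hv
      exact ⟨i, rfl, by omega, hi, hc.symm, fun p hp hp1 hp2 => by exfalso; omega⟩
    · rw [if_neg hc] at hv
      obtain ⟨m, hm1, hm2, hm3, hm4, hm5⟩ := h1 c v hv
      refine ⟨m, hm1, by omega, hm3, hm4, fun p hp hp1 hp2 => ?_⟩
      by_cases hpi : p = i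
      · subst hpi; exact fun he => hc he.symm
      · exact hm5 p hp hp1 (by omega)
  · intro m hm hmi
    rw [PySem.Dict.get?_insert]
    by_cases hc : l[m] = l[i]
    · rw [if_pos hc]; rfl
    · rw [if_neg hc]
      by_cases hmi' : m = i
      · exfalso; apply hc; subst hmi'; rfl
      · exact h2 m hm (by omega)

-- unfolding one iteration of the fold over the enumerated prefix
theorem fold_succ (l : List Char) (K : Int)
    (init : PySem.Dict Char Int × Int × List (List Char)) (i : Nat) (hi : i < l.length) :
    (PySem.List.enumerate (l.take (i + 1)) 0).foldl (KSubAStep l K) init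
      = KSubAStep l K ((PySem.List.enumerate (l.take i) 0).foldl (KSubAStep l K) init)
          ((i : Int), l[i]) := by
  rw [take_succ_getElem l i hi, PySem.List.enumerate_append, List.foldl_append]
  have hlen : (l.take i).length = i := by simp; omega
  simp [PySem.List.enumerate_cons, PySem.List.enumerate_nil, hlen]

theorem kQuals_zero (l : List Char) (k : Nat) (hk : 1 ≤ k) : KQuals l k 0 = [] := by
  unfold KQuals
  have : 1 - k = 0 := by omega
  simp [this]

theorem kQuals_succ (l : List Char) (k i : Nat) (hk : k ≤ i + 1) :
    KQuals l k (i + 1) = KQuals l k i ++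
      (if (KWin l k (i + 1 - k)).Nodup then [KWin l k (i + 1 - k)] else []) := by
  unfold KQuals
  have h2 : i + 1 + 1 - k = (i + 1 - k) + 1 := by omega
  rw [h2, List.range_succ, List.filter_append, List.map_append]
  congr 1
  by_cases h : (KWin l k (i + 1 - k)).Nodup <;> simp [h]

theorem kQuals_succ_of_lt (l : List Char) (k i : Nat) (hk : i + 1 < k) :
    KQuals l k (i + 1) = KQuals l k i := by
  unfold KQuals
  have h1 : i + 1 + 1 - k = 0 := by omega
  have h2 : i + 1 - k = 0 := by omega
  rw [h1, h2]

-- non-membership in a segment from an index property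
theorem notin_seg (l : List Char) (i q : Nat) (c : Char)
    (h : ∀ p, q ≤ p → p < i → l[p]? ≠ some c) : c ∉ (l.take i).drop q := by
  rw [mem_seg_iff]
  rintro ⟨p, h1, h2, h3⟩
  exact h p h1 h2 h3

theorem nodup_seg_succ (l : List Char) (i q : Nat) (hi : i < l.length) (hq : q ≤ i)
    (h1 : ((l.take i).drop q).Nodup) (h2 : l[i] ∉ (l.take i).drop q) :
    ((l.take (i + 1)).drop q).Nodup := by
  rw [drop_take_succ l i q hi hq, nodup_append_char]
  exact ⟨h1, h2⟩

-- a sub-segment of a nodup segment is nodup: l[q:i] nodup if l[a:b] ⊇ with a ≤ q, i ≤ b nodup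
theorem nodup_seg_mono (l : List Char) (i q q' : Nat) (h : q ≤ q')
    (hnd : ((l.take i).drop q).Nodup) : ((l.take i).drop q').Nodup := by
  have e : (l.take i).drop q' = ((l.take i).drop q).drop (q' - q) := by
    rw [List.drop_drop]; congr 1; omega
  rw [e]
  exact List.Sublist.nodup (List.drop_sublist _ _) hnd

theorem nodup_seg_of_nodup_win (l : List Char) (k a q i : Nat) (ha : a ≤ q) (hqi : q ≤ i)
    (hik : i ≤ a + k) (hw : (KWin l k a).Nodup) : ((l.take i).drop q).Nodup := by
  rw [List.drop_take]
  have e1 : ((KWin l k a).drop (q - a)).take (i - q) = (l.drop q).take (i - q) := by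
    rw [KWin, List.drop_take, List.drop_drop]
    have e2 : a + (q - a) = q := by omega
    rw [e2]
    rw [List.take_take]
    congr 1
    omega
  rw [← e1]
  exact List.Sublist.nodup ((List.take_sublist _ _).trans (List.drop_sublist _ _)) hw

theorem kInvA_step (l : List Char) (K : Int) (hK : 1 ≤ K) (i : Nat) (hi : i < l.length)
    (st : PySem.Dict Char Int × Int × List (List Char)) (h : KInvA l K i st) :
    KInvA l K (i + 1) (KSubAStep l K st ((i : Int), l[i])) := by
  obtain ⟨d, idx, lst⟩ := st
  obtain ⟨⟨j, hjeq, hjle, hjK, hjnd, hjmin⟩, hdict, hlst⟩ := h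
  simp only [] at hjeq hlst
  subst hjeq
  subst hlst
  have hKk : K = (K.toNat : Int) := (Int.toNat_of_nonneg (by omega)).symm
  set k := K.toNat with hkdef
  have hk1 : 1 ≤ k := by omega
  unfold KSubAStep
  simp only []
  by_cases hb1 : (d.contains (l[i]'hi) && decide (d.getD (l[i]'hi) 0 ≥ (j : Int))) = true
  · -- branch 1: the current character repeats inside the window; index jumps past its last occurrence
    rw [if_pos hb1]
    rw [Bool.and_eq_true] at hb1
    obtain ⟨hcon, hge⟩ := hb1
    have hsome : (d.get? (l[i]'hi)).isSome = true := by
      rw [← PySem.Dict.contains_eq_isSome_get?]; exact hcon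
    obtain ⟨v, hv⟩ := Option.isSome_iff_exists.mp hsome
    obtain ⟨m, hm1, hm2, hm3, hm4, hm5⟩ := hdict.1 _ v hv
    have hgd : d.getD (l[i]'hi) 0 = (m : Int) := by
      rw [PySem.Dict.getD_eq_get?_getD, hv, hm1]; rfl
    have hjm : j ≤ m := by
      rw [hgd] at hge
      have := of_decide_eq_true hge
      omega
    have hm? : l[m]? = some (l[i]'hi) := by
      rw [List.getElem?_eq_getElem hm3, hm4]
    have hnotin : (l[i]'hi) ∉ (l.take i).drop (m + 1) := by
      apply notin_seg
      intro p h1 h2 hp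
      obtain ⟨hplen, hpe⟩ := List.getElem?_eq_some_iff.mp hp
      exact hm5 p hplen (by omega) h2 hpe
    refine ⟨⟨m + 1, by rw [hgd]; push_cast; ring, by omega, by push_cast; omega, ?_, ?_⟩,
      kDictInv_step l i hi d hdict, ?_⟩
    · -- the new window l[m+1:i+1] is duplicate-free
      exact nodup_seg_succ l i (m + 1) hi (by omega)
        (nodup_seg_mono l i j (m + 1) (by omega) hjnd) hnotin
    · -- minimality: l[m:i+1] contains the repeated character twice
      refine Or.inr (Or.inl ?_)
      have hm11 : m + 1 - 1 = m := by omega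
      rw [hm11, drop_take_succ l i m hi (by omega), nodup_append_char]
      rintro ⟨-, hno⟩
      apply hno
      rw [mem_seg_iff]
      exact ⟨m, le_rfl, hm2, hm?⟩
    · -- no new qualifying window: the character at i already occurs at m inside it
      by_cases hkle : k ≤ i + 1
      · rw [kQuals_succ l k i hkle]
        have : ¬ (KWin l k (i + 1 - k)).Nodup := by
          apply kWin_not_nodup l k (i + 1 - k) m i (by omega) (by omega) (by omega)
            (by omega) (by omega) (by omega) (l[i]'hi) hm?
          rw [List.getElem?_eq_getElem hi]
        simp [this]
      · rw [kQuals_succ_of_lt l k i (by omega)]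
  · -- branch 2: the character at i does not occur in the current window
    rw [if_neg hb1]
    have hnotc : ∀ p, j ≤ p → p < i → l[p]? ≠ some (l[i]'hi) := by
      intro p h1 h2 hp
      obtain ⟨hplen, hpe⟩ := List.getElem?_eq_some_iff.mp hp
      by_cases hcon : d.contains (l[i]'hi) = true
      · have hsome : (d.get? (l[i]'hi)).isSome = true := by
          rw [← PySem.Dict.contains_eq_isSome_get?]; exact hcon
        obtain ⟨v, hv⟩ := Option.isSome_iff_exists.mp hsome
        obtain ⟨m, hm1, hm2, hm3, hm4, hm5⟩ := hdict.1 _ v hv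
        have hmj : m < j := by
          by_contra hmj
          apply hb1
          rw [Bool.and_eq_true]
          refine ⟨hcon, ?_⟩
          rw [PySem.Dict.getD_eq_get?_getD, hv, hm1]
          simp
          omega
        exact hm5 p hplen (by omega) h2 hpe
      · have := hdict.2 p hplen h2
        rw [hpe, ← PySem.Dict.contains_eq_isSome_get?] at this
        exact hcon this
    have hnotin : (l[i]'hi) ∉ (l.take i).drop j := notin_seg l i j _ hnotc
    by_cases hb2 : (((i : Int) - (j : Int) + 1) == K) = true
    · -- the window ending at i has exactly length K: it qualifies and is appended
      rw [if_pos hb2]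
      have hij : (i : Int) - (j : Int) + 1 = K := beq_iff_eq.mp hb2
      have hjk : j + k = i + 1 := by omega
      have hwin : KWin l k j = (l.take (i + 1)).drop j := by
        rw [KWin, List.drop_take]
        congr 1
        omega
      have hndw : ((l.take (i + 1)).drop j).Nodup :=
        nodup_seg_succ l i j hi (by omega) hjnd hnotin
      have hslice : PySem.List.slice l (some (j : Int)) (some ((i : Int) + 1))
          = KWin l k j := by
        have e : ((i : Int) + 1) = ((i + 1 : Nat) : Int) := by push_cast; ring
        rw [e, PySem.List.slice_natCast, KWin]
        congr 1
        omega
      refine ⟨⟨j + 1, by push_cast; ring, by omega, by push_cast; omega, ?_, ?_⟩,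
        kDictInv_step l i hi d hdict, ?_⟩
      · -- window minus its first character stays duplicate-free
        by_cases hji : j + 1 ≤ i
        · refine nodup_seg_succ l i (j + 1) hi hji ?_ ?_
          · exact nodup_seg_mono l i j (j + 1) (by omega) hjnd
          · apply notin_seg
            intro p h1 h2
            exact hnotc p (by omega) h2
        · have : (l.take (i + 1)).drop (j + 1) = [] :=
            List.drop_eq_nil_of_le (by simp; omega)
          rw [this]
          exact List.nodup_nil
      · exact Or.inr (Or.inr (by push_cast; omega))
      · -- the appended slice is the new qualifying window
        rw [hslice, kQuals_succ l k i (by omega)]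
        have hj' : i + 1 - k = j := by omega
        rw [hj']
        rw [if_pos (hwin ▸ hndw)]
    · -- window still shorter than K: nothing appended, index unchanged
      rw [if_neg hb2]
      have hij : (i : Int) - (j : Int) + 1 ≠ K := fun he => hb2 (beq_iff_eq.mpr he)
      refine ⟨⟨j, rfl, by omega, by omega, ?_, ?_⟩, kDictInv_step l i hi d hdict, ?_⟩
      · exact nodup_seg_succ l i j hi hjle hjnd hnotin
      · rcases hjmin with h0 | hnd | heq
        · exact Or.inl h0
        · refine Or.inr (Or.inl ?_)
          rw [drop_take_succ l i (j - 1) hi (by omega), nodup_append_char]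
          rintro ⟨hn, -⟩
          exact hnd hn
        · exact absurd (by omega) hij
      · by_cases hkle : k ≤ i + 1
        · rw [kQuals_succ l k i hkle]
          have hjlb : i + 1 - k + 1 ≤ j := by omega
          have hj0 : 1 ≤ j := by omega
          have hnd : ¬ ((l.take i).drop (j - 1)).Nodup := by
            rcases hjmin with h0 | hnd | heq
            · omega
            · exact hnd
            · exact absurd (by omega) hij
          have : ¬ (KWin l k (i + 1 - k)).Nodup := by
            intro hw
            exact hnd (nodup_seg_of_nodup_win l k (i + 1 - k) (j - 1) i (by omega)
              (by omega) (by omega) hw)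
          simp [this]
        · rw [kQuals_succ_of_lt l k i (by omega)]

theorem kInvA_fold (l : List Char) (K : Int) (hK : 1 ≤ K) :
    ∀ i, i ≤ l.length →
      KInvA l K i ((PySem.List.enumerate (l.take i) 0).foldl (KSubAStep l K)
        (PySem.Dict.empty, 0, [])) := by
  intro i
  induction i with
  | zero =>
    intro _
    refine ⟨⟨0, rfl, le_rfl, by omega, by simp, Or.inl rfl⟩, kDictInv_empty l, ?_⟩
    simp [kQuals_zero l K.toNat (by omega)]
  | succ i ih =>
    intro hle
    have hi : i < l.length := by omega
    rw [fold_succ l K _ i hi]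
    exact kInvA_step l K hK i hi _ (ih (by omega))

theorem kA0_fold (l : List Char) (K : Int) (hK : K < 1) :
    ∀ i, i ≤ l.length →
      ∃ d j, ((PySem.List.enumerate (l.take i) 0).foldl (KSubAStep l K)
        (PySem.Dict.empty, 0, [])) = (d, (j : Int), ([] : List (List Char)))
        ∧ j ≤ i ∧ KDictInv l i d := by
  intro i
  induction i with
  | zero =>
    intro _
    exact ⟨PySem.Dict.empty, 0, rfl, le_rfl, kDictInv_empty l⟩
  | succ i ih =>
    intro hle
    have hi : i < l.length := by omega
    obtain ⟨d, j, heq, hji, hdi⟩ := ih (by omega)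
    rw [fold_succ l K _ i hi, heq]
    unfold KSubAStep
    simp only []
    by_cases hb1 : (d.contains l[i] && decide (d.getD l[i] 0 ≥ (j : Int))) = true
    · rw [Bool.and_eq_true] at hb1
      obtain ⟨hcon, hge⟩ := hb1
      have hsome : (d.get? (l[i]'hi)).isSome = true := by
        rw [← PySem.Dict.contains_eq_isSome_get?]; exact hcon
      obtain ⟨v, hv⟩ := Option.isSome_iff_exists.mp hsome
      obtain ⟨m, hm1, hm2, _⟩ := hdi.1 l[i] v hv
      have hgd : d.getD l[i] 0 = (m : Int) := by
        rw [PySem.Dict.getD_eq_get?_getD, hv, hm1]; rfl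
      rw [if_pos (by rw [Bool.and_eq_true]; exact ⟨hcon, hge⟩)]
      refine ⟨_, m + 1, ?_, by omega, kDictInv_step l i hi d hdi⟩
      simp [hgd]
    · rw [if_neg hb1]
      have hb2 : (((i : Int) - (j : Int) + 1) == K) = false := by
        rw [beq_eq_false_iff_ne]
        omega
      rw [hb2, if_neg (by simp)]
      exact ⟨_, j, rfl, by omega, kDictInv_step l i hi d hdi⟩

-- de-duplication keeps a sublist
theorem foldl_add_sublist {α : Type} [BEq α] :
    ∀ (xs acc : List α), ∃ t, xs.foldl PySem.Set.add acc = acc ++ t ∧ t.Sublist xs := by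
  intro xs
  induction xs with
  | nil => exact fun acc => ⟨[], by simp, List.Sublist.refl []⟩
  | cons x xs ih =>
    intro acc
    simp only [List.foldl_cons]
    by_cases hc : acc.contains x = true
    · have hadd : PySem.Set.add acc x = acc := by simp [PySem.Set.add, hc]
      rw [hadd]
      obtain ⟨t, h1, h2⟩ := ih acc
      exact ⟨t, h1, h2.cons x⟩
    · have hadd : PySem.Set.add acc x = acc ++ [x] := by simp [PySem.Set.add, hc]
      rw [hadd]
      obtain ⟨t, h1, h2⟩ := ih (acc ++ [x])
      exact ⟨x :: t, by simpa using h1, h2.cons₂ x⟩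

theorem ofList_length_eq_iff {α : Type} [BEq α] [LawfulBEq α] (xs : List α) :
    (PySem.Set.ofList xs).length = xs.length ↔ xs.Nodup := by
  constructor
  · intro h
    obtain ⟨t, h1, h2⟩ := foldl_add_sublist xs ([] : List α)
    have hof : PySem.Set.ofList xs = t := by rw [PySem.Set.ofList_eq_foldl, h1]; simp
    have : PySem.Set.ofList xs = xs := by
      rw [hof]
      exact (List.Sublist.length_eq h2).mp (by rw [← hof, h])
    rw [← this]
    exact PySem.Set.nodup_ofList xs
  · intro h
    rw [PySem.Set.ofList_eq_self_of_nodup xs h]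

theorem foldl_addif (p : Nat → Bool) (f : Nat → List Char) :
    ∀ (js : List Nat) (acc : PySem.Set (List Char)),
      js.foldl (fun acc j => if p j then PySem.Set.add acc (f j) else acc) acc
        = ((js.filter p).map f).foldl PySem.Set.add acc := by
  intro js
  induction js with
  | nil => intro acc; rfl
  | cons j js ih =>
    intro acc
    by_cases hp : p j <;> simp [hp, ih]

-- B's fold computes the de-duplicated list of qualifying windows
theorem alt_eq (stringIn : String) (K : Int) (hK : 1 ≤ K) :
    KSubstring_alt stringIn K
      = ((PySem.Set.ofList (KQuals stringIn.toList K.toNat stringIn.toList.length)).length : Int) := by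
  unfold KSubstring_alt
  rw [if_neg (by omega)]
  simp only []
  set l := stringIn.toList with hldef
  set k := K.toNat with hkdef
  set n := l.length with hndef
  have hKk : K = (k : Int) := (Int.toNat_of_nonneg (by omega)).symm
  have hb : (((n : Int) - K + 1) - 0).toNat = n + 1 - k := by omega
  rw [PySem.List.pyRange_one, hb, List.foldl_map]
  have hcongr := PySem.List.foldl_congr_mem
    (l := List.range (n + 1 - k))
    (f := fun (acc : PySem.Set (List Char)) (t : Nat) =>
      if ((PySem.Set.ofList (PySem.List.slice l (some ((0 : Int) + (t : Int)))
            (some ((0 : Int) + (t : Int) + K)))).length : Int) == K then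
        PySem.Set.add acc (PySem.List.slice l (some ((0 : Int) + (t : Int)))
          (some ((0 : Int) + (t : Int) + K)))
      else acc)
    (g := fun (acc : PySem.Set (List Char)) (t : Nat) =>
      if decide ((KWin l k t).Nodup) then PySem.Set.add acc (KWin l k t) else acc)
    (init := PySem.Set.empty)
    (by
      intro acc t ht
      have htk : t + k ≤ n := by have := List.mem_range.mp ht; omega
      have hsl : PySem.List.slice l (some ((0 : Int) + (t : Int)))
          (some ((0 : Int) + (t : Int) + K)) = KWin l k t := by
        rw [hKk, zero_add, ← Nat.cast_add, PySem.List.slice_natCast, KWin,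
          Nat.add_sub_cancel_left]
      simp only [hsl]
      have hlen : (KWin l k t).length = k := by simp [KWin]; omega
      by_cases hnd : (KWin l k t).Nodup
      · have h1 : (((PySem.Set.ofList (KWin l k t)).length : Int) == K) = true := by
          rw [PySem.Set.ofList_eq_self_of_nodup _ hnd, hlen, hKk]
          simp
        simp [h1, hnd]
      · have h1 : (((PySem.Set.ofList (KWin l k t)).length : Int) == K) = false := by
          rw [beq_eq_false_iff_ne, hKk]
          intro he
          exact hnd ((ofList_length_eq_iff (KWin l k t)).mp
            ((by exact_mod_cast he : (PySem.Set.ofList (KWin l k t)).length = k).trans hlen.symm))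
        simp [h1, hnd])
  rw [hcongr, foldl_addif]
  have : PySem.Set.empty = ([] : PySem.Set (List Char)) := rfl
  rw [this, ← PySem.Set.ofList_eq_foldl]
  rfl

-- ===== VERDICT (by name: the statement is the Claim_ definition above) =====
theorem KSubstring_spec : Claim_equal_KSubstring := by
  intro stringIn K _
  unfold Spec_KSubstring KSubstring
  simp only []
  set l := stringIn.toList with hl
  by_cases hK : K < 1
  · obtain ⟨d, j, heq, -⟩ := kA0_fold l K hK l.length le_rfl
    rw [List.take_length] at heq
    rw [heq]
    unfold KSubstring_alt
    rw [if_pos hK]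
    rfl
  · have hK1 : 1 ≤ K := by omega
    have h := kInvA_fold l K hK1 l.length le_rfl
    rw [List.take_length] at h
    obtain ⟨-, -, hlst⟩ := h
    rw [hlst, alt_eq stringIn K hK1]
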